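-- pv_equiv track=rewrite | github.com/S-V-Naidu/Projects | Python Codes/Finding_the_mentioned_occurance_of_number.py | solve
-- ===== SOURCE A (Python) =====
-- def solve(X, arr, query_values):
--     x = []
--     for i in range(len(query_values)):
--         count = 0
--         for j in range(len(arr)):
--             if arr[j] == X:
--                 count+=1
--             if count == query_values[i]:
--                 x.append(j+1)
--                 break
--             elif j == (len(arr)-1):
--                 x.append(-1)
--     return x
-- ===== SOURCE B (Python) =====
-- def solve(X, arr, query_values):
--     # One pass: first[c] = 1-based index where the running count of X first equals c.
--     first = {}
--     c = 0
--     for j, v in enumerate(arr):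
--         if v == X:
--             c += 1
--         if c not in first:
--             first[c] = j + 1
--     return [first.get(q, -1) for q in query_values]
-- ===== Notes on version B (the rewrite author's own statement) =====
-- stated objective: faster
-- what changed: B precomputes in one pass a map from running-count values to the first index reaching them and answers each query by a single dictionary lookup, instead of rescanning the whole array per query.
-- intended difference: On an empty arr with nonempty query_values A returns [] (its inner loop never appends anything, silently dropping every query), while B returns -1 for each query, the intended 'not found' answer per query. — e.g. on solve(2, [], [1]): A returns [], B returns [-1]
import Mathlib
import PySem

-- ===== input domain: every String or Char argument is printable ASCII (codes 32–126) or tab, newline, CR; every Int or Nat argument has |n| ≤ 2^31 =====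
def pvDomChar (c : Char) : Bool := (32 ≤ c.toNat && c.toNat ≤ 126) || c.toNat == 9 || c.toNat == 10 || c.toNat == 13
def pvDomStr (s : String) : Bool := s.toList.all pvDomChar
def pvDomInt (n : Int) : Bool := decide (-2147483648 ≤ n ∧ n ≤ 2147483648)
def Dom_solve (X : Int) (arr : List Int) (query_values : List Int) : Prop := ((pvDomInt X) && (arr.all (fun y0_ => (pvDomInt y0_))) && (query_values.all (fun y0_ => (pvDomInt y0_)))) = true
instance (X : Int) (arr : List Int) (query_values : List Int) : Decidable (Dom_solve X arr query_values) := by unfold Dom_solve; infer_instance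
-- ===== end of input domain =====

-- B replaces A's per-query rescan of arr by one precomputation pass plus a dict lookup per query (faster).

-- ===== PORT A =====
-- inner loop of A over the remaining suffix of arr: j = current index, count = occurrences of X seen
def solveInner (X q : Int) : List Int → Nat → Int → List Int
  | [], _, _ => []
  | v :: rest, j, count =>
    let count' := if v = X then count + 1 else count
    if count' = q then [(j : Int) + 1]
    else if rest = [] then [-1]      -- j == len(arr)-1
    else solveInner X q rest (j + 1) count'

def solve (X : Int) (arr : List Int) (query_values : List Int) : List Int :=
  query_values.foldl (fun x q => x ++ solveInner X q arr 0 0) []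

-- ===== PORT B =====
-- one pass: record the first 1-based index at which the running count of X equals c
def buildFirst (X : Int) : List Int → Nat → Int → PySem.Dict Int Int → PySem.Dict Int Int
  | [], _, _, d => d
  | v :: rest, j, c, d =>
    let c' := if v = X then c + 1 else c
    let d' := if d.contains c' then d else d.insert c' ((j : Int) + 1)
    buildFirst X rest (j + 1) c' d'

def solve_alt (X : Int) (arr : List Int) (query_values : List Int) : List Int :=
  let first := buildFirst X arr 0 0 PySem.Dict.empty
  query_values.map (fun q => first.getD q (-1))

-- ===== PRECONDITION & SPEC =====
-- On an empty arr with nonempty query_values A returns [] (its inner loop never appends anything,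
-- silently dropping every query), while B returns -1 for each query, the intended answer per query.
def D_solve (_X : Int) (arr : List Int) (query_values : List Int) : Prop :=
  arr = [] ∧ query_values ≠ []
instance (X : Int) (arr : List Int) (query_values : List Int) : Decidable (D_solve X arr query_values) := by unfold D_solve; infer_instance

def Spec_solve (X : Int) (arr : List Int) (query_values : List Int) (out : List Int) : Prop :=
  ¬ D_solve X arr query_values → out = solve_alt X arr query_values
instance (X : Int) (arr : List Int) (query_values : List Int) (out : List Int) : Decidable (Spec_solve X arr query_values out) := by unfold Spec_solve; infer_instance

def pvDiffWitness_solve : Int × List Int × List Int := (2, [], [1])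
def pvDiffWitnessOut_solve : (List Int) × (List Int) := ([], [-1])

-- ===== CLAIM (what is proved, stated in full; the proofs are below) =====
def Claim_unchanged_solve : Prop := ∀ (X : Int) (arr : List Int) (query_values : List Int), Dom_solve X arr query_values → Spec_solve X arr query_values (solve X arr query_values)
def Claim_changed_solve : Prop := Dom_solve (pvDiffWitness_solve.1) (pvDiffWitness_solve.2.1) (pvDiffWitness_solve.2.2) ∧ D_solve (pvDiffWitness_solve.1) (pvDiffWitness_solve.2.1) (pvDiffWitness_solve.2.2) ∧ solve (pvDiffWitness_solve.1) (pvDiffWitness_solve.2.1) (pvDiffWitness_solve.2.2) = pvDiffWitnessOut_solve.1 ∧ solve_alt (pvDiffWitness_solve.1) (pvDiffWitness_solve.2.1) (pvDiffWitness_solve.2.2) = pvDiffWitnessOut_solve.2 ∧ pvDiffWitnessOut_solve.1 ≠ pvDiffWitnessOut_solve.2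
def Claim_exact_solve : Prop := ∀ (X : Int) (arr : List Int) (query_values : List Int), Dom_solve X arr query_values → D_solve X arr query_values → solve X arr query_values ≠ solve_alt X arr query_values

-- ===== LEMMAS AND PROOFS =====

-- abstract value: first 1-based index in l (starting at j, count c) where the running count of X equals q, else -1
def fFind (X q : Int) : List Int → Nat → Int → Int
  | [], _, _ => -1
  | v :: rest, j, c =>
    let c' := if v = X then c + 1 else c
    if c' = q then (j : Int) + 1 else fFind X q rest (j + 1) c'

theorem solveInner_eq_fFind (X q : Int) (l : List Int) (j : Nat) (c : Int) (h : l ≠ []) :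
    solveInner X q l j c = [fFind X q l j c] := by
  induction l generalizing j c with
  | nil => exact absurd rfl h
  | cons v rest ih =>
    simp only [solveInner, fFind]
    split_ifs <;> try rfl
    all_goals rename_i hre
    all_goals first
      | (subst hre; rfl)
      | exact ih (j + 1) _ hre

theorem getD_buildFirst (X q : Int) (l : List Int) (j : Nat) (c : Int) (d : PySem.Dict Int Int) :
    (buildFirst X l j c d).getD q (-1) =
      match d.get? q with
      | some v => v
      | none => fFind X q l j c := by
  induction l generalizing j c d with
  | nil =>
    simp only [buildFirst, fFind]
    rcases hd : d.get? q with _ | v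
    · simp [PySem.Dict.getD_eq_get?_getD, hd]
    · simp [PySem.Dict.getD_eq_get?_getD, hd]
  | cons v rest ih =>
    simp only [buildFirst, fFind]
    set c' := if v = X then c + 1 else c with hc'
    rcases hd : d.get? q with _ | w
    · -- q not yet bound
      by_cases hq : c' = q
      · subst hq
        have hcont : d.contains c' = false := by
          rw [PySem.Dict.contains_eq_isSome_get?, hd]; rfl
        rw [if_neg (by simp [hcont])]
        rw [ih]
        simp
      · have hget : (if d.contains c' then d else d.insert c' ((j : Int) + 1)).get? q = none := by
          split
          · exact hd
          · rw [PySem.Dict.get?_insert, if_neg (fun h => hq h.symm), hd]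
        rw [ih, hget, if_neg hq]
    · -- q already bound to w: the update never touches it
      have hget : (if d.contains c' then d else d.insert c' ((j : Int) + 1)).get? q = some w := by
        split
        · exact hd
        · rename_i hcont
          rw [PySem.Dict.get?_insert]
          split
          · rename_i hqe
            rw [hqe] at hd
            rw [PySem.Dict.contains_eq_isSome_get?, hd] at hcont
            simp at hcont
          · exact hd
      rw [ih, hget]

theorem foldl_append_singleton (g : Int → Int) (qs : List Int) (acc : List Int) :
    qs.foldl (fun x q => x ++ [g q]) acc = acc ++ qs.map g := by
  induction qs generalizing acc with
  | nil => simp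
  | cons q rest ih => simp [List.foldl, ih]

theorem solve_nil (X : Int) (qs : List Int) : solve X [] qs = [] := by
  have h : ∀ acc, qs.foldl (fun x q => x ++ solveInner X q [] 0 0) acc = acc := by
    induction qs with
    | nil => intro acc; rfl
    | cons q rest ih => intro acc; simp [List.foldl, solveInner]
  exact h []

-- ===== VERDICT (by name: the statement is the Claim_ definition above) =====
theorem solve_spec : Claim_unchanged_solve := by
  intro X arr qs _ hnd
  rcases arr with _ | ⟨a, t⟩
  · have hq : qs = [] := by
      by_contra hq
      exact hnd ⟨rfl, hq⟩
    subst hq; rfl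
  · unfold solve solve_alt
    have hmap : ∀ q, solveInner X q (a :: t) 0 0 = [(buildFirst X (a :: t) 0 0 PySem.Dict.empty).getD q (-1)] := by
      intro q
      rw [solveInner_eq_fFind X q (a :: t) 0 0 (by simp)]
      rw [getD_buildFirst]
      simp [PySem.Dict.get?_empty]
    have hfun : (fun (x : List Int) q => x ++ solveInner X q (a :: t) 0 0)
        = fun x q => x ++ [(buildFirst X (a :: t) 0 0 PySem.Dict.empty).getD q (-1)] := by
      funext x q; rw [hmap]
    rw [hfun, foldl_append_singleton]
    rfl

theorem solve_changed : Claim_changed_solve := by unfold Claim_changed_solve; decide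

theorem solve_tight : Claim_exact_solve := by
  intro X arr qs _ hd
  rcases hd with ⟨ha, hq⟩
  subst ha
  rw [solve_nil]
  unfold solve_alt
  intro h
  exact hq (List.map_eq_nil_iff.mp h.symm)
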